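-- pv_equiv track=rewrite | github.com/shahabi8/Training | python/median.py | getMinTotalDistance
-- ===== SOURCE A (Python) =====
-- def getMinTotalDistance(dist_centers):
--     # Sort the positions of the distribution centers
--     dist_centers.sort()
--
--     n = len(dist_centers)
--
--     # Edge case: If we have fewer than two distribution centers
--     if n <= 2:
--         return 0
--
--     # Calculate the positions for the two warehouses
--     warehouse1_position = dist_centers[n // 4]
--     warehouse2_position = dist_centers[3 * n // 4]
--
--     # Calculate the total minimum distance
--     total_distance = 0
--     for center in dist_centers:
--         total_distance += min(abs(center - warehouse1_position), abs(center - warehouse2_position))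
--
--     return total_distance
-- ===== SOURCE B (Python) =====
-- def _select(xs, k):
--     # iterative quickselect: k-th smallest (0-based)
--     while True:
--         p = xs[0]
--         lt = [x for x in xs if x < p]
--         if k < len(lt):
--             xs = lt
--             continue
--         eqc = sum(1 for x in xs if x == p)
--         if k < len(lt) + eqc:
--             return p
--         k -= len(lt) + eqc
--         xs = [x for x in xs if x > p]
--
--
-- def getMinTotalDistance(dist_centers):
--     n = len(dist_centers)
--     if n <= 2:
--         return 0
--     w1 = _select(dist_centers, n // 4)
--     w2 = _select(dist_centers, 3 * n // 4)
--     return sum(min(abs(c - w1), abs(c - w2)) for c in dist_centers)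
-- ===== Notes on version B (the rewrite author's own statement) =====
-- stated objective: alternative
-- what changed: Replaces sort-then-index with an iterative quickselect for the two quartile order statistics and a single summing pass over the unsorted list (A also sorts its argument in place; B leaves it untouched - the claim is about the return value); asymptotically O(n) expected vs O(n log n), but not measurably faster in CPython where sort runs at C speed.
import Mathlib
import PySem

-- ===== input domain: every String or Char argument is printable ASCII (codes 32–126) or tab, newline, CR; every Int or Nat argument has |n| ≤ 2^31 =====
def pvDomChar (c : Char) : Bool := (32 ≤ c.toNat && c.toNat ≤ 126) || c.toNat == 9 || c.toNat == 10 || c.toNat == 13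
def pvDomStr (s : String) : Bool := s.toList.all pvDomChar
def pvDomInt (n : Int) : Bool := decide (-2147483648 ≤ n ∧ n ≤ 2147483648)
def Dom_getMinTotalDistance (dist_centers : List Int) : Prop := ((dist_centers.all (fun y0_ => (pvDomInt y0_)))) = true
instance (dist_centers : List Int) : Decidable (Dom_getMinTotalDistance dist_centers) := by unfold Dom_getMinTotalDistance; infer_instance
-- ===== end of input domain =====

-- B replaces A's sort (A sorts its argument in place; the claim is about the return value only)
-- with an iterative quickselect of the two quartile order statistics plus one summing pass over the unsorted list.

-- ===== PORT A =====
def getMinTotalDistance (dist_centers : List Int) : Int :=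
  let sorted := PySem.List.sorted dist_centers (fun x => x) false
  let n : Int := sorted.length
  if n ≤ 2 then 0
  else
    let w1 := PySem.List.pyGetD sorted (PySem.Int.floordiv n 4) 0
    let w2 := PySem.List.pyGetD sorted (PySem.Int.floordiv (3 * n) 4) 0
    sorted.foldl (fun acc c => acc + min |c - w1| |c - w2|) 0

-- ===== PORT B =====
-- quickselect: k-th smallest (0-based); the [] case is unreachable for 0 ≤ k < len
def pvSelect : List Int → Int → Int
  | [], _ => 0
  | p :: rest, k =>
    let lt := (p :: rest).filter (fun x => x < p)
    if k < (lt.length : Int) then pvSelect lt k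
    else
      let eqc := ((p :: rest).filter (fun x => x == p)).length
      if k < (lt.length : Int) + (eqc : Int) then p
      else pvSelect ((p :: rest).filter (fun x => p < x)) (k - ((lt.length : Int) + (eqc : Int)))
termination_by xs _ => xs.length
decreasing_by
  · simpa [List.filter_cons] using Nat.lt_succ_of_le (List.length_filter_le _ rest)
  · simpa [List.filter_cons] using Nat.lt_succ_of_le (List.length_filter_le _ rest)

def getMinTotalDistance_alt (dist_centers : List Int) : Int :=
  let n : Int := dist_centers.length
  if n ≤ 2 then 0
  else
    let w1 := pvSelect dist_centers (PySem.Int.floordiv n 4)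
    let w2 := pvSelect dist_centers (PySem.Int.floordiv (3 * n) 4)
    (dist_centers.map (fun c => min |c - w1| |c - w2|)).sum

-- ===== PRECONDITION & SPEC =====
def Spec_getMinTotalDistance (dist_centers : List Int) (out : Int) : Prop := out = getMinTotalDistance_alt dist_centers
instance (dist_centers : List Int) (out : Int) : Decidable (Spec_getMinTotalDistance dist_centers out) := by unfold Spec_getMinTotalDistance; infer_instance

-- ===== CLAIM (what is proved, stated in full; the proofs are below) =====
def Claim_equal_getMinTotalDistance : Prop := ∀ (dist_centers : List Int), Dom_getMinTotalDistance dist_centers → Spec_getMinTotalDistance dist_centers (getMinTotalDistance dist_centers)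

-- ===== LEMMAS AND PROOFS =====

-- partition of a list by a pivot is a permutation of it
lemma pvPartitionPerm (p : Int) (xs : List Int) :
    (xs.filter (fun x => x < p) ++ xs.filter (fun x => x == p) ++ xs.filter (fun x => p < x)).Perm xs := by
  induction xs with
  | nil => simp
  | cons a t ih =>
    rcases lt_trichotomy a p with h | h | h
    · have e1 : (a :: t).filter (fun x => x < p) = a :: t.filter (fun x => x < p) :=
        List.filter_cons_of_pos (by simpa using h)
      have e2 : (a :: t).filter (fun x => x == p) = t.filter (fun x => x == p) :=
        List.filter_cons_of_neg (by simp; omega)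
      have e3 : (a :: t).filter (fun x => p < x) = t.filter (fun x => p < x) :=
        List.filter_cons_of_neg (by simp; omega)
      rw [e1, e2, e3]
      exact ih.cons a
    · have e1 : (a :: t).filter (fun x => x < p) = t.filter (fun x => x < p) :=
        List.filter_cons_of_neg (by simp; omega)
      have e2 : (a :: t).filter (fun x => x == p) = a :: t.filter (fun x => x == p) :=
        List.filter_cons_of_pos (by simp [h])
      have e3 : (a :: t).filter (fun x => p < x) = t.filter (fun x => p < x) :=
        List.filter_cons_of_neg (by simp; omega)
      rw [e1, e2, e3]
      exact ((List.perm_middle).append (List.Perm.refl _)).trans (ih.cons a)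
    · have e1 : (a :: t).filter (fun x => x < p) = t.filter (fun x => x < p) :=
        List.filter_cons_of_neg (by simp; omega)
      have e2 : (a :: t).filter (fun x => x == p) = t.filter (fun x => x == p) :=
        List.filter_cons_of_neg (by simp; omega)
      have e3 : (a :: t).filter (fun x => p < x) = a :: t.filter (fun x => p < x) :=
        List.filter_cons_of_pos (by simpa using h)
      rw [e1, e2, e3]
      exact (List.perm_middle).trans (ih.cons a)

-- sorted(xs) splits at a pivot into sorted(<p) ++ (=p) ++ sorted(>p)
lemma pvSortedSplit (p : Int) (xs : List Int) :
    PySem.List.sorted xs (fun x => x) false =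
      PySem.List.sorted (xs.filter (fun x => x < p)) (fun x => x) false
        ++ xs.filter (fun x => x == p)
        ++ PySem.List.sorted (xs.filter (fun x => p < x)) (fun x => x) false := by
  apply PySem.List.sorted_id_eq_of_perm_of_pairwise
  · exact (((PySem.List.sorted_perm _ _ _).append (List.Perm.refl _)).append
      (PySem.List.sorted_perm _ _ _)).trans (pvPartitionPerm p xs)
  · have hlt : ∀ x ∈ PySem.List.sorted (xs.filter (fun x => x < p)) (fun x => x) false, x < p := by
      intro x hx
      have := (PySem.List.mem_sorted _ _ _ _).mp hx
      simpa using (List.mem_filter.mp this).2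
    have heq : ∀ x ∈ xs.filter (fun x => x == p), x = p := by
      intro x hx; simpa using (List.mem_filter.mp hx).2
    have hgt : ∀ x ∈ PySem.List.sorted (xs.filter (fun x => p < x)) (fun x => x) false, p < x := by
      intro x hx
      have := (PySem.List.mem_sorted _ _ _ _).mp hx
      simpa using (List.mem_filter.mp this).2
    rw [List.pairwise_append, List.pairwise_append]
    refine ⟨⟨PySem.List.sorted_pairwise _ _, ?_, ?_⟩, PySem.List.sorted_pairwise _ _, ?_⟩
    · exact List.pairwise_of_forall_mem_list (fun a ha b hb => by rw [heq a ha, heq b hb])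
    · intro a ha b hb
      have h1 := hlt a ha
      have h2 := heq b hb
      omega
    · intro a ha b hb
      have h2 := hgt b hb
      rcases List.mem_append.mp ha with ha | ha
      · have := hlt a ha; omega
      · have := heq a ha; omega

-- getD of a list whose members all equal p
lemma pvGetDConst (l : List Int) (p : Int) (i : Nat) (hall : ∀ x ∈ l, x = p) (hi : i < l.length) :
    l.getD i 0 = p := by
  rw [List.getD_eq_getElem l 0 hi]
  exact hall _ (l.getElem_mem hi)

-- quickselect returns the k-th element of the sorted list
lemma pvSelect_eq (n : Nat) : ∀ (xs : List Int) (k : Int), xs.length = n → 0 ≤ k → k < (xs.length : Int) →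
    pvSelect xs k = (PySem.List.sorted xs (fun x => x) false).getD k.toNat 0 := by
  induction n using Nat.strong_induction_on with
  | _ n ih =>
    intro xs k hn h0 h1
    match xs, hn with
    | [], hn => simp at h1; omega
    | p :: rest, hn =>
      have hsplit := pvSortedSplit p (p :: rest)
      have hlen : ((p :: rest).filter (fun x => x < p)).length
          + ((p :: rest).filter (fun x => x == p)).length
          + ((p :: rest).filter (fun x => p < x)).length = (p :: rest).length := by
        have h := (pvPartitionPerm p (p :: rest)).length_eq
        simp only [List.length_append] at h
        omega
      have hpmem : p ∈ (p :: rest).filter (fun x => x == p) := by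
        simp
      have hf2pos : 0 < ((p :: rest).filter (fun x => x == p)).length :=
        List.length_pos_of_mem hpmem
      have hf1lt : ((p :: rest).filter (fun x => x < p)).length < (p :: rest).length := by omega
      have hf3lt : ((p :: rest).filter (fun x => p < x)).length < (p :: rest).length := by omega
      rw [pvSelect, hsplit]
      by_cases hc1 : k < (((p :: rest).filter (fun x => x < p)).length : Int)
      · rw [if_pos hc1]
        rw [ih _ (hn ▸ hf1lt) _ k rfl h0 hc1]
        rw [List.getD_append _ _ _ _ (by
          simp only [List.length_append, PySem.List.length_sorted]; omega),
          List.getD_append _ _ _ _ (by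
          simp only [PySem.List.length_sorted]; omega)]
      · rw [if_neg hc1]
        by_cases hc2 : k < (((p :: rest).filter (fun x => x < p)).length : Int)
            + (((p :: rest).filter (fun x => x == p)).length : Int)
        · rw [if_pos hc2]
          have hallmid : ∀ x ∈ (p :: rest).filter (fun x => x == p), x = p := by
            intro x hx
            have := (List.mem_filter.mp hx).2
            simpa using this
          rw [List.getD_append _ _ _ _ (by
            simp only [List.length_append, PySem.List.length_sorted]; omega),
            List.getD_append_right _ _ _ _ (by simp only [PySem.List.length_sorted]; omega),
            PySem.List.length_sorted]
          exact (pvGetDConst _ p _ hallmid (by omega)).symm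
        · rw [if_neg hc2]
          have hb0 : 0 ≤ k - ((((p :: rest).filter (fun x => x < p)).length : Int)
              + (((p :: rest).filter (fun x => x == p)).length : Int)) := by omega
          have hb1 : k - ((((p :: rest).filter (fun x => x < p)).length : Int)
              + (((p :: rest).filter (fun x => x == p)).length : Int))
              < (((p :: rest).filter (fun x => p < x)).length : Int) := by
            omega
          rw [ih _ (hn ▸ hf3lt) _ _ rfl hb0 hb1]
          rw [List.getD_append_right _ _ _ _ (by
            simp only [List.length_append, PySem.List.length_sorted]; omega)]
          congr 1
          simp only [List.length_append, PySem.List.length_sorted]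
          omega

-- the proved equality, spelled out
lemma pvMain (dc : List Int) : getMinTotalDistance dc = getMinTotalDistance_alt dc := by
  simp only [getMinTotalDistance, getMinTotalDistance_alt, PySem.List.length_sorted]
  by_cases h : ((dc.length : Int) ≤ 2)
  · simp [h]
  · rw [if_neg h, if_neg h]
    have hlen3 : 3 ≤ (dc.length : Int) := by omega
    have hi1 : PySem.Int.floordiv (dc.length : Int) 4 = (dc.length : Int) / 4 :=
      PySem.Int.floordiv_eq_ediv_of_pos (by norm_num)
    have hi2 : PySem.Int.floordiv (3 * (dc.length : Int)) 4 = (3 * (dc.length : Int)) / 4 :=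
      PySem.Int.floordiv_eq_ediv_of_pos (by norm_num)
    have hb1 : 0 ≤ (dc.length : Int) / 4 ∧ (dc.length : Int) / 4 < (dc.length : Int) := by omega
    have hb2 : 0 ≤ (3 * (dc.length : Int)) / 4 ∧ (3 * (dc.length : Int)) / 4 < (dc.length : Int) := by
      omega
    have hw1 : PySem.List.pyGetD (PySem.List.sorted dc (fun x => x) false)
        (PySem.Int.floordiv (dc.length : Int) 4) 0 = pvSelect dc (PySem.Int.floordiv (dc.length : Int) 4) := by
      rw [PySem.List.pyGetD_of_nonneg _ _ (by rw [hi1]; exact hb1.1),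
        pvSelect_eq dc.length dc _ rfl (by rw [hi1]; exact hb1.1) (by rw [hi1]; exact hb1.2)]
    have hw2 : PySem.List.pyGetD (PySem.List.sorted dc (fun x => x) false)
        (PySem.Int.floordiv (3 * (dc.length : Int)) 4) 0 = pvSelect dc (PySem.Int.floordiv (3 * (dc.length : Int)) 4) := by
      rw [PySem.List.pyGetD_of_nonneg _ _ (by rw [hi2]; exact hb2.1),
        pvSelect_eq dc.length dc _ rfl (by rw [hi2]; exact hb2.1) (by rw [hi2]; exact hb2.2)]
    rw [hw1, hw2]
    rw [PySem.List.foldl_add]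
    rw [zero_add]
    exact ((PySem.List.sorted_perm dc (fun x => x) false).map _).sum_eq

-- ===== VERDICT (by name: the statement is the Claim_ definition above) =====
theorem getMinTotalDistance_spec : Claim_equal_getMinTotalDistance := by
  intro dc _
  exact pvMain dc
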